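-- pv_equiv track=rewrite | github.com/Qazalbash/GradVault | programming-fundamentals/final/no pair allowed.py | minimalOperations
-- ===== SOURCE A (Python) =====
-- from typing import Any
--
-- def minimalOperations(words: Any) -> Any:
--     change = []
--     for i in range(len(words)):
--         w, index, cd = list(words[i]), 0, True
--         for j in range(len(w) - 1):
--             if cd == False:
--                 cd = True
--             elif w[j] == w[j + 1]:
--                 cd = False
--                 index += 1
--         change.append(index)
--     return change
-- ===== SOURCE B (Python) =====
-- def _word_ops(word):
--     # group consecutive equal characters into runs; each run of length L needs L//2 changes
--     chars = list(word)
--     total, i, n = 0, 0, len(chars)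
--     while i < n:
--         j = i
--         while j < n and chars[j] == chars[i]:
--             j += 1
--         total += (j - i) // 2
--         i = j
--     return total
--
-- def minimalOperations(words):
--     return [_word_ops(word) for word in words]
-- ===== Notes on version B (the rewrite author's own statement) =====
-- stated objective: alternative
-- what changed: Replaced the per-position greedy toggle flag over adjacent index pairs with explicit run-length grouping of consecutive equal characters followed by summing len(run)//2 over the runs.
import Mathlib
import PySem

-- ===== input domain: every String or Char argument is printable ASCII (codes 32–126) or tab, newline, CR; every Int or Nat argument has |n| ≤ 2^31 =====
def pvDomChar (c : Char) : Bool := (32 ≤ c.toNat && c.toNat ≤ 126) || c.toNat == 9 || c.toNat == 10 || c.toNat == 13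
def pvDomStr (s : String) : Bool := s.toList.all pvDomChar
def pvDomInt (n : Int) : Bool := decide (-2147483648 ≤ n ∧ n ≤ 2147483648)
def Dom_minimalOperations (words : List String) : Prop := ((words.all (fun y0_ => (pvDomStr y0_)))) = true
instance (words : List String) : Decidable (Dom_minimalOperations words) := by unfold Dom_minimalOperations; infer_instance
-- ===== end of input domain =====

-- B replaces A's per-position toggle-flag greedy with run-length grouping + sum of len//2 (alternative decomposition, same cost).

-- ===== PORT A =====
-- inner loop of A: walks adjacent pairs w[j], w[j+1] with the toggle flag cd;
-- 'index += 1' is rendered as '+ 1' on the way out of the recursion.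
def aInner : List Char → Bool → Int
  | a :: b :: rest, cd =>
      if cd = false then aInner (b :: rest) true
      else if a == b then aInner (b :: rest) false + 1
      else aInner (b :: rest) true
  | _, _ => 0

def minimalOperations (words : List String) : List Int :=
  words.foldl (fun change w => change ++ [aInner w.toList true]) []

-- ===== PORT B =====
-- inner 'while j < n and chars[j] == chars[i]' of Source B: strip the run of c off the front,
-- returning (extra run length, remaining suffix)
def takeRun (c : Char) : List Char → Nat × List Char
  | [] => (0, [])
  | x :: xs => if x = c then ((takeRun c xs).1 + 1, (takeRun c xs).2) else (0, x :: xs)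

theorem takeRun_len (c : Char) : ∀ xs : List Char, (takeRun c xs).2.length ≤ xs.length
  | [] => by simp [takeRun]
  | x :: xs => by
      by_cases h : x = c <;> simp [takeRun, h]
      exact Nat.le_succ_of_le (takeRun_len c xs)

-- outer while of _word_ops: sum (run length)//2 over the runs
def bCount : List Char → Int
  | [] => 0
  | c :: xs => ((((takeRun c xs).1 + 1) / 2 : Nat) : Int) + bCount (takeRun c xs).2
termination_by l => l.length
decreasing_by
  have := takeRun_len c xs
  simp
  omega

def minimalOperations_alt (words : List String) : List Int :=
  words.map (fun word => bCount word.toList)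

-- ===== PRECONDITION & SPEC =====
def Spec_minimalOperations (words : List String) (out : List Int) : Prop := out = minimalOperations_alt words
instance (words : List String) (out : List Int) : Decidable (Spec_minimalOperations words out) := by unfold Spec_minimalOperations; infer_instance

-- ===== CLAIM (what is proved, stated in full; the proofs are below) =====
def Claim_equal_minimalOperations : Prop := ∀ (words : List String), Dom_minimalOperations words → Spec_minimalOperations words (minimalOperations words)

-- ===== LEMMAS AND PROOFS =====

-- with cd = false the next pair is skipped and the flag resets
theorem aInner_false : ∀ xs : List Char, ∀ x : Char, aInner (x :: xs) false = aInner xs true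
  | [], _ => by simp [aInner]
  | y :: ys, x => by simp [aInner]

-- peeling the head run: its length/2 plus the count of the suffix is the whole count
theorem bCount_peel (c : Char) (xs : List Char) :
    (((takeRun c xs).1 / 2 : Nat) : Int) + bCount (takeRun c xs).2 = bCount xs := by
  cases xs with
  | nil => simp [takeRun, bCount]
  | cons y ys =>
      by_cases h : y = c
      · subst h
        rw [bCount]
        simp [takeRun]
      · simp [takeRun, h]

-- main equivalence of the two inner algorithms
theorem inner_eq : ∀ l : List Char, aInner l true = bCount l
  | [] => by simp [aInner, bCount]
  | [c] => by simp [aInner, bCount, takeRun]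
  | c :: d :: xs => by
      by_cases h : d = c
      · subst h
        have h1 : aInner (d :: d :: xs) true = aInner xs true + 1 := by
          simp [aInner, aInner_false]
        have h2 : bCount (d :: d :: xs) = bCount xs + 1 := by
          rw [bCount]
          simp only [takeRun, if_true]
          have hb := bCount_peel d xs
          have harith : ((((takeRun d xs).1 + 1 + 1) / 2 : Nat) : Int)
              = (((takeRun d xs).1 / 2 : Nat) : Int) + 1 := by
            have : ((takeRun d xs).1 + 1 + 1) / 2 = (takeRun d xs).1 / 2 + 1 := by omega
            rw [this]; push_cast; ring
          rw [harith]
          omega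
        rw [h1, h2, inner_eq xs]
      · have h1 : aInner (c :: d :: xs) true = aInner (d :: xs) true := by
          have : (c == d) = false := by simp; intro hcd; exact h hcd.symm
          simp [aInner, this]
        have h2 : bCount (c :: d :: xs) = bCount (d :: xs) := by
          rw [bCount]
          simp [takeRun, h]
        rw [h1, h2, inner_eq (d :: xs)]
termination_by l => l.length

-- A's append-foldl builds the map of the inner function
theorem foldl_append_map (f : String → Int) :
    ∀ (ws : List String) (acc : List Int),
      ws.foldl (fun change w => change ++ [f w]) acc = acc ++ ws.map f
  | [], acc => by simp
  | w :: ws, acc => by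
      simp [List.foldl, foldl_append_map f ws (acc ++ [f w])]

-- ===== VERDICT (by name: the statement is the Claim_ definition above) =====
theorem minimalOperations_spec : Claim_equal_minimalOperations := by
  intro words _
  unfold Spec_minimalOperations minimalOperations minimalOperations_alt
  rw [foldl_append_map]
  simp only [List.nil_append]
  exact List.map_congr_left fun w _ => inner_eq w.toList
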